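-- pv_equiv track=rewrite | github.com/aalto-speech/PPG2Speech | ppg_tts/evaluation/evaluate_ppg/ppg_edit.py | IdxSeq2Range
-- ===== SOURCE A (Python) =====
-- from collections import defaultdict
-- from typing import Tuple, List, Dict
--
-- SUBSAMPLING_FACTOR = 3
--
-- def IdxSeq2Range(seq: List[int]) -> Dict[int, List[Tuple]]:
--     ranges = defaultdict(list)
--
--     start = 0
--     n = len(seq)
--
--     for i in range(1, n + 1):
--         if i == n or seq[i] != seq[i - 1]:  # End of a segment
--             idx = seq[start]
--             ranges[idx].append(
--                 (start * SUBSAMPLING_FACTOR, i * SUBSAMPLING_FACTOR)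
--             )
--             start = i  # Update the start of the next segment
--
--     return ranges
-- ===== SOURCE B (Python) =====
-- from collections import defaultdict
--
-- SUBSAMPLING_FACTOR = 3
--
-- def IdxSeq2Range(seq):
--     # Inverted-index algorithm: first collect, per value, the list of all
--     # positions where it occurs; then compress each value's (increasing)
--     # position list into maximal blocks of consecutive indices, which are
--     # exactly that value's runs, and scale the block boundaries.
--     occ = defaultdict(list)
--     for i, v in enumerate(seq):
--         occ[v].append(i)
--     ranges = defaultdict(list)
--     for v, pos in occ.items():
--         s = pos[0]
--         prev = pos[0]
--         for p in pos[1:]: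
--             if p != prev + 1:
--                 ranges[v].append((s * SUBSAMPLING_FACTOR, (prev + 1) * SUBSAMPLING_FACTOR))
--                 s = p
--             prev = p
--         ranges[v].append((s * SUBSAMPLING_FACTOR, (prev + 1) * SUBSAMPLING_FACTOR))
--     return ranges
-- ===== Notes on version B (the rewrite author's own statement) =====
-- stated objective: alternative
-- what changed: Replaces A's single boundary-scan over indices by a two-stage inverted-index algorithm: first build a dict mapping each value to the list of all positions where it occurs, then compress each value's position list into maximal blocks of consecutive indices (which are exactly that value's runs) and scale the block boundaries.
import Mathlib
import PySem

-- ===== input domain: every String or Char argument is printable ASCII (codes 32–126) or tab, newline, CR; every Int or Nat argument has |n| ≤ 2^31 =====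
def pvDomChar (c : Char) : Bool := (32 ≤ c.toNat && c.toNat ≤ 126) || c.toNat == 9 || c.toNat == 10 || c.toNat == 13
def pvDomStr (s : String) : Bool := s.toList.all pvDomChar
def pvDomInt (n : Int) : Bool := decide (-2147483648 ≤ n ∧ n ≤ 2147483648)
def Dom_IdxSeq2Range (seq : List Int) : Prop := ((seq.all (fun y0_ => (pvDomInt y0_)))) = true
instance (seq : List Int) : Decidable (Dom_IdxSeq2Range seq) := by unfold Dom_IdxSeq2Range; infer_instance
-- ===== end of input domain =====

-- B replaces A's boundary scan by an inverted index (positions per value) compressed into consecutive blocks; objective: alternative algorithm, same cost.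


def SUBSAMPLING_FACTOR : Int := 3

-- ===== PORT A =====
-- A's loop body: 'if i == n or seq[i] != seq[i-1]: ranges[seq[start]].append((start*F, i*F)); start = i'.
-- seq[i] is read only when i ≠ n and seq[start] only with start < n, so pyGetD's default 0 is never the value used.
def aStep (seq : List Int) (st : PySem.Dict Int (List (Int × Int)) × Int) (i : Int) :
    PySem.Dict Int (List (Int × Int)) × Int :=
  if i == (seq.length : Int) || !(PySem.List.pyGetD seq i 0 == PySem.List.pyGetD seq (i - 1) 0) then
    (st.1.modify (PySem.List.pyGetD seq st.2 0) []
        (· ++ [(st.2 * SUBSAMPLING_FACTOR, i * SUBSAMPLING_FACTOR)]), i)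
  else st

def IdxSeq2Range (seq : List Int) : List (Int × List (Int × Int)) :=
  let n : Int := seq.length
  ((PySem.List.pyRange 1 (n + 1) 1).foldl (aStep seq) (PySem.Dict.empty, 0)).1.items

-- ===== PORT B =====
-- Source B inner loop 'for p in pos[1:]', carrying (s, prev, ranges)
def bInner (v : Int) (st : Int × Int × PySem.Dict Int (List (Int × Int))) (p : Int) :
    Int × Int × PySem.Dict Int (List (Int × Int)) :=
  if !(p == st.2.1 + 1) then
    (p, p, st.2.2.modify v []
        (· ++ [(st.1 * SUBSAMPLING_FACTOR, (st.2.1 + 1) * SUBSAMPLING_FACTOR)]))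
  else (st.1, p, st.2.2)

-- one iteration of Source B's outer loop; occ's value lists are always nonempty, so pos[0] never raises
def bOuter (r : PySem.Dict Int (List (Int × Int))) (kv : Int × List Int) :
    PySem.Dict Int (List (Int × Int)) :=
  match kv.2 with
  | [] => r
  | p0 :: rest =>
    let st := rest.foldl (bInner kv.1) (p0, p0, r)
    st.2.2.modify kv.1 []
      (· ++ [(st.1 * SUBSAMPLING_FACTOR, (st.2.1 + 1) * SUBSAMPLING_FACTOR)])

def IdxSeq2Range_alt (seq : List Int) : List (Int × List (Int × Int)) :=
  let occ := (PySem.List.enumerate seq).foldl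
      (fun d iv => d.modify iv.2 [] (· ++ [iv.1])) PySem.Dict.empty
  (occ.items.foldl bOuter PySem.Dict.empty).items

-- ===== PRECONDITION & SPEC =====
def Spec_IdxSeq2Range (seq : List Int) (out : List (Int × List (Int × Int))) : Prop := out = IdxSeq2Range_alt seq
instance (seq : List Int) (out : List (Int × List (Int × Int))) : Decidable (Spec_IdxSeq2Range seq out) := by unfold Spec_IdxSeq2Range; infer_instance

-- ===== CLAIM (what is proved, stated in full; the proofs are below) =====
def Claim_equal_IdxSeq2Range : Prop := ∀ (seq : List Int), Dom_IdxSeq2Range seq → Spec_IdxSeq2Range seq (IdxSeq2Range seq)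

-- ===== LEMMAS AND PROOFS =====

-- the run decomposition of seq starting at absolute position pos, as (value, scaled range) pairs
def runPairs (pos : Int) : List Int → List (Int × (Int × Int))
  | [] => []
  | x :: rest =>
    let len : Int := ((rest.takeWhile (fun y => y == x)).length : Int) + 1
    (x, (pos * SUBSAMPLING_FACTOR, (pos + len) * SUBSAMPLING_FACTOR)) ::
      runPairs (pos + len) (rest.dropWhile (fun y => y == x))
termination_by l => l.length
decreasing_by simpa using Nat.lt_succ_of_le (List.length_dropWhile_le (fun y => y == x) rest)

-- A's dict built run by run (bridge between A's index loop and runPairs)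
def altGo (pos : Int) (d : PySem.Dict Int (List (Int × Int))) :
    List Int → PySem.Dict Int (List (Int × Int))
  | [] => d
  | x :: rest =>
    let len : Int := ((rest.takeWhile (fun y => y == x)).length : Int) + 1
    altGo (pos + len)
      (d.modify x [] (· ++ [(pos * SUBSAMPLING_FACTOR, (pos + len) * SUBSAMPLING_FACTOR)]))
      (rest.dropWhile (fun y => y == x))
termination_by l => l.length
decreasing_by simpa using Nat.lt_succ_of_le (List.length_dropWhile_le (fun y => y == x) rest)

-- the positions (offset off) at which k occurs
def posOf (k : Int) (off : Int) : List Int → List Int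
  | [] => []
  | x :: xs => if x == k then off :: posOf k (off + 1) xs else posOf k (off + 1) xs

-- Source B's inner-loop compression, as a pure function
def compressFrom (s prev : Int) : List Int → List (Int × Int)
  | [] => [(s * SUBSAMPLING_FACTOR, (prev + 1) * SUBSAMPLING_FACTOR)]
  | p :: ps =>
    if !(p == prev + 1) then
      (s * SUBSAMPLING_FACTOR, (prev + 1) * SUBSAMPLING_FACTOR) :: compressFrom p p ps
    else compressFrom s p ps

def compressList : List Int → List (Int × Int)
  | [] => []
  | p :: ps => compressFrom p p ps


theorem foldl_fixed_of_mem {σ α : Type} {f : σ → α → σ} {init : σ} {l : List α}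
    (h : ∀ x ∈ l, f init x = init) : l.foldl f init = init := by
  induction l with
  | nil => rfl
  | cons y ys ih =>
    rw [List.foldl_cons, h y (List.mem_cons_self), ih (fun x hx => h x (List.mem_cons_of_mem y hx))]


theorem getD_run (seq : List Int) (start : Nat) (x : Int) (rest : List Int)
    (h : seq.drop start = x :: rest) (k : Nat)
    (hk : k ≤ (rest.takeWhile (fun y => y == x)).length) :
    seq.getD (start + k) 0 = x := by
  have hlen : seq.length - start = rest.length + 1 := by
    simpa using congrArg List.length h
  have hr : (rest.takeWhile (fun y => y == x)).length ≤ rest.length :=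
    (List.takeWhile_prefix _).length_le
  have hlt : start + k < seq.length := by omega
  have hk2 : k < (seq.drop start).length := by simp; omega
  rw [List.getD_eq_getElem _ _ hlt]
  have e1 : seq[start + k]'hlt = (seq.drop start)[k]'hk2 := by rw [List.getElem_drop]
  rw [e1, List.getElem_of_eq h]
  match k, hk with
  | 0, _ => simp
  | (j+1), hk =>
    have hj : j < (rest.takeWhile (fun y => y == x)).length := by omega
    have e2 : (rest.takeWhile (fun y => y == x))[j]'hj = rest[j]'(by omega) :=
      (List.takeWhile_prefix _).getElem hj
    have hm : ((rest.takeWhile (fun y => y == x))[j]'hj == x) = true :=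
      List.mem_takeWhile_imp (p := fun y => y == x) (List.getElem_mem hj)
    simp only [List.getElem_cons_succ]
    rw [← e2]
    exact beq_iff_eq.mp hm


theorem loop_eq (tail : List Int) (seq : List Int) (start : Nat)
    (d : PySem.Dict Int (List (Int × Int))) (h : seq.drop start = tail) :
    ((PySem.List.pyRange ((start : Int) + 1) ((seq.length : Int) + 1) 1).foldl
        (aStep seq) (d, (start : Int))).1 = altGo (start : Int) d tail := by
  match tail, h with
  | [], h =>
    have hle : seq.length ≤ start := List.drop_eq_nil_iff.mp h
    rw [PySem.List.pyRange_one_eq_nil (by exact_mod_cast Nat.succ_le_succ hle)]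
    simp [altGo]
  | x :: rest, h =>
    have hlen : seq.length - start = rest.length + 1 := by
      simpa using congrArg List.length h
    have hstart : start < seq.length := by omega
    have hn : seq.length = start + rest.length + 1 := by omega
    have hr : (rest.takeWhile (fun y => y == x)).length ≤ rest.length :=
      (List.takeWhile_prefix _).length_le
    set r := (rest.takeWhile (fun y => y == x)).length with hrdef
    rw [PySem.List.pyRange_one_append ((start : Int) + 1) ((start : Int) + 1 + (r : Int))
        ((seq.length : Int) + 1) (by omega) (by omega), List.foldl_append]
    have hfix : ∀ i ∈ PySem.List.pyRange ((start : Int) + 1) ((start : Int) + 1 + (r : Int)) 1,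
        aStep seq (d, (start : Int)) i = (d, (start : Int)) := by
      intro i hi
      rw [PySem.List.mem_pyRange_one] at hi
      obtain ⟨j, hj, rfl⟩ : ∃ j : Nat, j + 1 ≤ r ∧ i = ((start + (j + 1) : Nat) : Int) :=
        ⟨(i - start - 1).toNat, by omega, by push_cast; omega⟩
      have g1 : PySem.List.pyGetD seq ((start + (j + 1) : Nat) : Int) 0 = x := by
        rw [PySem.List.pyGetD_natCast]
        exact getD_run seq start x rest h (j + 1) hj
      have g2 : PySem.List.pyGetD seq (((start + (j + 1) : Nat) : Int) - 1) 0 = x := by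
        rw [show ((start + (j + 1) : Nat) : Int) - 1 = ((start + j : Nat) : Int) from by push_cast; ring,
          PySem.List.pyGetD_natCast]
        exact getD_run seq start x rest h j (by omega)
      have hb : (((start + (j + 1) : Nat) : Int) == ((seq.length : Int))) = false :=
        beq_eq_false_iff_ne.mpr (by push_cast; omega)
      unfold aStep
      rw [g1, g2, hb]
      simp
    rw [foldl_fixed_of_mem hfix]
    rw [PySem.List.pyRange_one_cons (by omega), List.foldl_cons]
    have hx : PySem.List.pyGetD seq ((start : Int)) 0 = x := by
      rw [PySem.List.pyGetD_natCast]
      simpa using getD_run seq start x rest h 0 (Nat.zero_le _)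
    have hcond : aStep seq (d, (start : Int)) ((start : Int) + 1 + (r : Int)) =
        (d.modify x [] (· ++ [((start : Int) * SUBSAMPLING_FACTOR,
            ((start : Int) + 1 + (r : Int)) * SUBSAMPLING_FACTOR)]), (start : Int) + 1 + (r : Int)) := by
      by_cases hend : start + 1 + r = seq.length
      · have hb : (((start : Int) + 1 + (r : Int)) == ((seq.length : Int))) = true :=
          beq_iff_eq.mpr (by omega)
        unfold aStep
        rw [hb, hx]
        simp
      · have hrlt : r < rest.length := by omega
        have gcur : PySem.List.pyGetD seq ((start : Int) + 1 + (r : Int)) 0 = rest[r]'hrlt := by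
          rw [show ((start : Int) + 1 + (r : Int)) = ((start + (r + 1) : Nat) : Int) from by push_cast; ring,
            PySem.List.pyGetD_natCast, List.getD_eq_getElem _ _ (by omega)]
          have e1 : seq[start + (r + 1)]'(by omega) = (seq.drop start)[r + 1]'(by simp; omega) := by
            rw [List.getElem_drop]
          rw [e1, List.getElem_of_eq h, List.getElem_cons_succ]
        have gprev : PySem.List.pyGetD seq ((start : Int) + 1 + (r : Int) - 1) 0 = x := by
          rw [show ((start : Int) + 1 + (r : Int) - 1) = ((start + r : Nat) : Int) from by push_cast; ring,
            PySem.List.pyGetD_natCast]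
          exact getD_run seq start x rest h r (le_refl r)
        have hdw : rest.dropWhile (fun y => y == x) ≠ [] := by
          intro hnil
          have := congrArg List.length
            (List.takeWhile_append_dropWhile (p := fun y => y == x) (l := rest))
          rw [hnil] at this
          simp at this
          omega
        have h0 : 0 < (rest.dropWhile (fun y => y == x)).length := List.length_pos_iff.mpr hdw
        have hsplit : rest = rest.takeWhile (fun y => y == x) ++ rest.dropWhile (fun y => y == x) :=
          (List.takeWhile_append_dropWhile (p := fun y => y == x) (l := rest)).symm
        have he : rest[r]'hrlt = (rest.dropWhile (fun y => y == x))[0]'h0 := by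
          rw [List.getElem_of_eq hsplit, List.getElem_append_right (by omega)]
          congr 1
          omega
        have hhead' : ((rest.dropWhile (fun y => y == x))[0]'h0 == x) = false := by
          rw [← List.head_eq_getElem]
          exact List.head_dropWhile_not (fun y => y == x) hdw
        have hfail : (rest[r]'hrlt == x) = false := by rw [he]; exact hhead'
        have hb : (((start : Int) + 1 + (r : Int)) == ((seq.length : Int))) = false :=
          beq_eq_false_iff_ne.mpr (by omega)
        unfold aStep
        rw [gcur, gprev, hx, hb, hfail]
        simp
    rw [hcond]
    have hdrop : seq.drop (start + 1 + r) = rest.dropWhile (fun y => y == x) := by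
      have h1 : seq.drop (start + 1) = rest := by
        have := congrArg (List.drop 1) h
        simpa [List.drop_drop] using this
      have h2 : seq.drop (start + 1 + r) = rest.drop r := by
        rw [← h1, List.drop_drop]
      have h3 := List.drop_left (l₁ := rest.takeWhile (fun y => y == x))
        (l₂ := rest.dropWhile (fun y => y == x))
      rw [List.takeWhile_append_dropWhile] at h3
      rw [h2, hrdef, h3]
    have hrec := loop_eq (rest.dropWhile (fun y => y == x)) seq (start + 1 + r)
      (d.modify x [] (· ++ [((start : Int) * SUBSAMPLING_FACTOR,
        ((start : Int) + 1 + (r : Int)) * SUBSAMPLING_FACTOR)])) hdrop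
    rw [show ((start + 1 + r : Nat) : Int) = (start : Int) + 1 + (r : Int) from by push_cast; ring] at hrec
    rw [hrec]
    simp only [altGo]
    rw [show (start : Int) + 1 + (r : Int) = (start : Int) + ((r : Int) + 1) from by ring]
termination_by tail.length
decreasing_by
  simpa using Nat.lt_succ_of_le (List.length_dropWhile_le (fun y => y == x) rest)


theorem altGo_eq_foldl (l : List Int) : ∀ (pos : Int) (d : PySem.Dict Int (List (Int × Int))),
    altGo pos d l = (runPairs pos l).foldl (fun d p => d.modify p.1 [] (· ++ [p.2])) d := by
  match l with
  | [] => intro pos d; simp [altGo, runPairs]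
  | x :: rest =>
    intro pos d
    simp only [altGo, runPairs, List.foldl_cons]
    exact altGo_eq_foldl (rest.dropWhile (fun y => y == x)) _ _
termination_by l.length
decreasing_by simpa using Nat.lt_succ_of_le (List.length_dropWhile_le (fun y => y == x) rest)

theorem filter_enumerate_posOf (k : Int) (seq : List Int) : ∀ (off : Int),
    ((((PySem.List.enumerate seq off).map (fun iv => (iv.2, iv.1))).filter
        (fun p => p.1 == k)).map (·.2)) = posOf k off seq := by
  induction seq with
  | nil => intro off; simp [PySem.List.enumerate_nil, posOf]
  | cons x xs ih =>
    intro off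
    rw [PySem.List.enumerate_cons]
    simp only [List.map_cons, List.filter_cons, posOf]
    by_cases hx : x == k
    · simp [hx, ih]
    · simp [hx, ih (off+1)]

theorem posOf_ne_nil (k : Int) (seq : List Int) : ∀ (off : Int), k ∈ seq → posOf k off seq ≠ [] := by
  induction seq with
  | nil => simp
  | cons x xs ih =>
    intro off hm
    simp only [posOf]
    by_cases hx : x == k
    · simp [hx]
    · simp [hx]
      have : k ∈ xs := by
        rcases List.mem_cons.mp hm with h | h
        · exact absurd (by simp [h]) hx
        · exact h
      exact ih (off+1) this

theorem posOf_ge (k : Int) (seq : List Int) : ∀ (off p : Int), p ∈ posOf k off seq → off ≤ p := by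
  induction seq with
  | nil => simp [posOf]
  | cons x xs ih =>
    intro off p hp
    simp only [posOf] at hp
    by_cases hx : x == k
    · simp [hx] at hp
      rcases hp with h | h
      · omega
      · have := ih (off+1) p h; omega
    · simp [hx] at hp
      have := ih (off+1) p hp; omega

theorem posOf_append (k : Int) (l1 : List Int) : ∀ (l2 : List Int) (off : Int),
    posOf k off (l1 ++ l2) = posOf k off l1 ++ posOf k (off + l1.length) l2 := by
  induction l1 with
  | nil => simp [posOf]
  | cons x xs ih =>
    intro l2 off
    simp only [List.cons_append, posOf, ih]
    by_cases hx : x == k <;> simp [hx] <;> ring_nf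

theorem posOf_not_mem (k : Int) (l : List Int) : ∀ (off : Int), k ∉ l → posOf k off l = [] := by
  induction l with
  | nil => simp [posOf]
  | cons x xs ih =>
    intro off h
    have hx : (x == k) = false := by simp; rintro rfl; exact h (by simp)
    simp only [posOf, hx, Bool.false_eq_true, if_false]
    exact ih (off+1) (fun hm => h (List.mem_cons_of_mem _ hm))

theorem compress_block (x : Int) (tw : List Int) : ∀ (s prev : Int) (tail : List Int),
    (∀ y ∈ tw, y = x) →
    compressFrom s prev (posOf x (prev + 1) tw ++ tail)
      = compressFrom s (prev + (tw.length : Int)) tail := by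
  induction tw with
  | nil => intro s prev tail _; simp [posOf]
  | cons y ys ih =>
    intro s prev tail h
    have hy : y = x := h y (by simp)
    subst hy
    simp only [posOf, beq_self_eq_true, if_true, List.cons_append]
    have e : compressFrom s prev ((prev + 1) :: (posOf y (prev + 1 + 1) ys ++ tail))
        = compressFrom s (prev + 1) (posOf y ((prev + 1) + 1) ys ++ tail) := by
      simp [compressFrom]
    rw [e, ih s (prev + 1) tail (fun z hz => h z (List.mem_cons_of_mem _ hz))]
    congr 1
    simp only [List.length_cons]
    push_cast
    ring

theorem runPairs_filter (k : Int) (seq : List Int) (off : Int) :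
    ((runPairs off seq).filter (fun p => p.1 == k)).map (·.2) = compressList (posOf k off seq) := by
  match seq with
  | [] => simp [runPairs, posOf, compressList]
  | x :: rest =>
    have htw : ∀ y ∈ rest.takeWhile (fun y => y == x), y = x := fun y hy =>
      beq_iff_eq.mp (List.mem_takeWhile_imp (p := fun y => y == x) hy)
    have hsplit : rest = rest.takeWhile (fun y => y == x) ++ rest.dropWhile (fun y => y == x) :=
      (List.takeWhile_append_dropWhile).symm
    have ihrec := runPairs_filter k (rest.dropWhile (fun y => y == x))
      (off + (((rest.takeWhile (fun y => y == x)).length : Int) + 1))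
    rw [show off + (((rest.takeWhile (fun y => y == x)).length : Int) + 1)
        = off + 1 + ((rest.takeWhile (fun y => y == x)).length : Int) from by ring] at ihrec
    simp only [runPairs, List.filter_cons]
    rw [show off + (((rest.takeWhile (fun y => y == x)).length : Int) + 1)
        = off + 1 + ((rest.takeWhile (fun y => y == x)).length : Int) from by ring]
    by_cases hk : (x == k) = true
    · have hxk := beq_iff_eq.mp hk
      subst hxk
      simp only [beq_self_eq_true, if_true, List.map_cons, ihrec]
      have hpos : posOf x off (x :: rest)
          = off :: (posOf x (off + 1) (rest.takeWhile (fun y => y == x))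
              ++ posOf x (off + 1 + ((rest.takeWhile (fun y => y == x)).length : Int))
                  (rest.dropWhile (fun y => y == x))) := by
        simp only [posOf, beq_self_eq_true, if_true]
        conv_lhs => rw [hsplit]
        rw [posOf_append]
      rw [hpos]
      simp only [compressList]
      rw [compress_block x _ off off _ htw]
      rcases hT : posOf x (off + 1 + ((rest.takeWhile (fun y => y == x)).length : Int))
          (rest.dropWhile (fun y => y == x)) with _ | ⟨q, qs⟩
      · simp only [compressFrom]
        rw [show off + 1 + ((rest.takeWhile (fun y => y == x)).length : Int)
            = off + ((rest.takeWhile (fun y => y == x)).length : Int) + 1 from by ring]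
      · have hq : off + ((rest.takeWhile (fun y => y == x)).length : Int) + 2 ≤ q := by
          rcases hdw : rest.dropWhile (fun y => y == x) with _ | ⟨y, ys⟩
          · rw [hdw] at hT; simp [posOf] at hT
          · have hne' : rest.dropWhile (fun y => y == x) ≠ [] := by rw [hdw]; simp
            have h5 := List.head_dropWhile_not (fun y => y == x) hne'
            rw [List.head_eq_getElem] at h5
            have hy : (y == x) = false := by simpa [hdw] using h5
            rw [hdw] at hT
            simp only [posOf, hy, Bool.false_eq_true, if_false] at hT
            have hqm : q ∈ posOf x (off + 1 + ((rest.takeWhile (fun y => y == x)).length : Int) + 1) ys := by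
              rw [hT]; simp
            have := posOf_ge x ys _ q hqm
            omega
        have hne : (q == off + ((rest.takeWhile (fun y => y == x)).length : Int) + 1) = false := by
          simp; omega
        have hne2 : (q == off + 1 + ((rest.takeWhile (fun y => y == x)).length : Int)) = false := by
          simp; omega
        simp only [compressFrom, hne, Bool.not_false, if_true]
        rw [show off + 1 + ((rest.takeWhile (fun y => y == x)).length : Int)
            = off + ((rest.takeWhile (fun y => y == x)).length : Int) + 1 from by ring]
    · have hxk : x ≠ k := by simpa using hk
      simp only [hk, Bool.false_eq_true, if_false, ihrec]
      have hpos : posOf k off (x :: rest)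
          = posOf k (off + 1 + ((rest.takeWhile (fun y => y == x)).length : Int))
              (rest.dropWhile (fun y => y == x)) := by
        simp only [posOf, hk, Bool.false_eq_true, if_false]
        conv_lhs => rw [hsplit]
        rw [posOf_append, posOf_not_mem k _ _ (fun hm => hxk ((htw k hm).symm))]
        simp
      rw [hpos]
termination_by seq.length
decreasing_by
  simpa using Nat.lt_succ_of_le (List.length_dropWhile_le (fun y => y == x) rest)

theorem update_runPairs_keys (seq : List Int) (off : Int) (s : PySem.Set Int) :
    PySem.Set.update s ((runPairs off seq).map (·.1)) = PySem.Set.update s seq := by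
  match seq with
  | [] => simp [runPairs]
  | x :: rest =>
    have htw : ∀ y ∈ rest.takeWhile (fun y => y == x), y = x := fun y hy =>
      beq_iff_eq.mp (List.mem_takeWhile_imp (p := fun y => y == x) hy)
    have hsplit : rest = rest.takeWhile (fun y => y == x) ++ rest.dropWhile (fun y => y == x) :=
      (List.takeWhile_append_dropWhile).symm
    have ihrec := update_runPairs_keys (rest.dropWhile (fun y => y == x))
      (off + (((rest.takeWhile (fun y => y == x)).length : Int) + 1)) (PySem.Set.add s x)
    simp only [runPairs, List.map_cons, PySem.Set.update_cons, ihrec]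
    conv_rhs => rw [hsplit]
    rw [PySem.Set.update_append]
    congr 1
    rw [PySem.Set.update_eq_append_filter, List.filter_eq_nil_iff.mpr]
    · simp
    · intro y hy
      have : y = x := htw y ((PySem.Set.mem_ofList _ _).mp hy)
      subst this
      have : y ∈ PySem.Set.add s y := by
        by_cases h : y ∈ s
        · rw [PySem.Set.add_of_mem h]; exact h
        · rw [PySem.Set.add_of_not_mem h]; simp
      simp [PySem.Set.contains_eq_listContains, this]
termination_by seq.length
decreasing_by
  simpa using Nat.lt_succ_of_le (List.length_dropWhile_le (fun y => y == x) rest)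

theorem items_groupFold {ν : Type} (l : List (Int × ν)) :
    (l.foldl (fun d p => d.modify p.1 [] (· ++ [p.2]))
        (PySem.Dict.empty : PySem.Dict Int (List ν))).items
      = (PySem.Set.ofList (l.map (·.1))).map
          (fun k => (k, (l.filter (fun p => p.1 == k)).map (·.2))) := by
  have hk := PySem.Dict.keys_foldl_modify_key l (·.1) ([] : List ν)
      (fun _ p v => v ++ [p.2]) PySem.Dict.empty
  have hnd := PySem.Dict.nodup_keys_foldl_modify_key l (·.1) ([] : List ν)
      (fun _ p v => v ++ [p.2]) PySem.Dict.empty (by simp [PySem.Dict.keys_empty])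
  rw [PySem.Dict.items_eq_map_keys _ hnd []]
  rw [hk, PySem.Dict.keys_empty, PySem.Set.update_nil_left]
  apply List.map_congr_left
  intro k hkmem
  have := PySem.Dict.getD_foldl_modify_append l PySem.Dict.empty k
  simp [PySem.Dict.getD_empty] at this
  simp [this]

theorem inner_eq (v : Int) (rest : List Int) : ∀ (s prev : Int) (r : PySem.Dict Int (List (Int × Int))),
    (let st := rest.foldl (bInner v) (s, prev, r);
     st.2.2.modify v [] (· ++ [(st.1 * SUBSAMPLING_FACTOR, (st.2.1 + 1) * SUBSAMPLING_FACTOR)]))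
      = (compressFrom s prev rest).foldl (fun d rng => d.modify v [] (· ++ [rng])) r := by
  induction rest with
  | nil => intro s prev r; simp [compressFrom]
  | cons p ps ih =>
    intro s prev r
    by_cases hp : p == prev + 1
    · simp only [List.foldl_cons, compressFrom, bInner, hp, Bool.not_true, Bool.false_eq_true,
        if_false]
      exact ih s p r
    · simp only [List.foldl_cons, compressFrom, bInner, hp, Bool.not_false, if_true]
      exact ih p p _

theorem bOuter_eq (v p0 : Int) (restp : List Int) (r : PySem.Dict Int (List (Int × Int))) :
    bOuter r (v, p0 :: restp)
      = (compressFrom p0 p0 restp).foldl (fun d rng => d.modify v [] (· ++ [rng])) r := by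
  rw [← inner_eq v restp p0 p0 r]
  rfl

theorem compressFrom_ne_nil (l : List Int) : ∀ (s prev : Int), compressFrom s prev l ≠ [] := by
  induction l with
  | nil => intro s prev; simp [compressFrom]
  | cons p ps ih =>
    intro s prev
    by_cases hp : p == prev + 1 <;> simp [compressFrom, hp, ih]

theorem modfold_keys (v : Int) (rs : List (Int × Int)) (r : PySem.Dict Int (List (Int × Int)))
    (hni : v ∉ r.keys) (hrs : rs ≠ []) :
    (rs.foldl (fun d rng => d.modify v [] (· ++ [rng])) r).keys = r.keys ++ [v] := by
  have hk := PySem.Dict.keys_foldl_modify_key rs (fun _ => v) ([] : List (Int × Int))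
      (fun _ rng u => u ++ [rng]) r
  rw [hk]
  obtain ⟨q, qs, rfl⟩ := List.exists_cons_of_ne_nil hrs
  simp only [List.map_cons, PySem.Set.update_cons, PySem.Set.add_of_not_mem hni]
  rw [PySem.Set.update_eq_append_filter]
  rw [List.filter_eq_nil_iff.mpr]
  · simp
  · intro y hy
    have : y = v := by
      exact ((by simpa using (PySem.Set.mem_ofList _ _).mp hy : ¬qs = [] ∧ y = v)).2
    subst this
    simp [PySem.Set.contains_eq_listContains]

theorem modfold_items (v : Int) (rs : List (Int × Int)) (r : PySem.Dict Int (List (Int × Int)))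
    (hnd : r.keys.Nodup) (hni : v ∉ r.keys) (hrs : rs ≠ []) :
    (rs.foldl (fun d rng => d.modify v [] (· ++ [rng])) r).items = r.items ++ [(v, rs)] := by
  have hfm : rs.foldl (fun d rng => d.modify v [] (· ++ [rng])) r
      = (rs.map (fun rng => ((v : Int), rng))).foldl (fun d p => d.modify p.1 [] (· ++ [p.2])) r := by
    rw [List.foldl_map]
  have hnd' : (rs.foldl (fun d rng => d.modify v [] (· ++ [rng])) r).keys.Nodup := by
    rw [hfm]
    exact PySem.Dict.nodup_keys_foldl_modify_key _ (fun (p : Int × (Int × Int)) => p.1)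
      ([] : List (Int × Int)) (fun _ p u => u ++ [p.2]) r hnd
  rw [PySem.Dict.items_eq_map_keys _ hnd' [], modfold_keys v rs r hni hrs]
  have hcontains : r.contains v = false := by
    rw [PySem.Dict.contains_eq_decide_mem_keys]
    simp [hni]
  have hgd : ∀ k, (rs.foldl (fun d rng => d.modify v [] (· ++ [rng])) r).getD k []
      = r.getD k [] ++ (if k = v then rs else []) := by
    intro k
    rw [hfm, PySem.Dict.getD_foldl_modify_append]
    by_cases hkv : k = v
    · subst hkv
      rw [List.filter_map]
      simp [Function.comp]
    · simp only [if_neg hkv]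
      rw [List.filter_eq_nil_iff.mpr]
      · simp
      · intro p hp
        obtain ⟨rng, _, rfl⟩ := List.mem_map.mp hp
        simp [Ne.symm hkv]
  rw [List.map_append]
  congr 1
  · rw [PySem.Dict.items_eq_map_keys r hnd []]
    apply List.map_congr_left
    intro k hk
    have hkv : k ≠ v := fun h => hni (h ▸ hk)
    rw [hgd k, if_neg hkv, List.append_nil]
  · simp only [List.map_cons, List.map_nil, hgd v, if_pos]
    rw [PySem.Dict.getD_of_not_contains r [] hcontains]
    simp

theorem phase2 (L : List (Int × List Int)) : ∀ (r : PySem.Dict Int (List (Int × Int))),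
    (r.keys ++ L.map (·.1)).Nodup → (∀ kv ∈ L, kv.2 ≠ []) →
    (L.foldl bOuter r).items = r.items ++ L.map (fun kv => (kv.1, compressList kv.2)) := by
  induction L with
  | nil => intro r _ _; simp
  | cons kv L' ih =>
    intro r hnd hne
    obtain ⟨k, pos⟩ := kv
    obtain ⟨p0, restp, rfl⟩ := List.exists_cons_of_ne_nil (hne (k, pos) (by simp))
    have hrkeys : r.keys.Nodup := (List.nodup_append.mp hnd).1
    have hkni : k ∉ r.keys := by
      intro hk
      exact (List.nodup_append.mp hnd).2.2 k hk k (by simp) rfl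
    rw [List.foldl_cons, bOuter_eq]
    have hcne := compressFrom_ne_nil restp p0 p0
    rw [ih _ (by
        rw [modfold_keys k _ r hkni hcne]
        simp only [List.map_cons] at hnd
        rw [List.append_cons] at hnd
        exact hnd)
      (fun kv hkv => hne kv (List.mem_cons_of_mem _ hkv))]
    rw [modfold_items k _ r hrkeys hkni hcne]
    simp [compressList]

-- ===== VERDICT (by name: the statement is the Claim_ definition above) =====
theorem IdxSeq2Range_spec : Claim_equal_IdxSeq2Range := by
  intro seq _
  show IdxSeq2Range seq = IdxSeq2Range_alt seq
  unfold IdxSeq2Range IdxSeq2Range_alt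
  -- A side: index loop → run recursion → group fold over runPairs → characterized items
  have hA := loop_eq seq seq 0 PySem.Dict.empty (by simp)
  have hA2 : ((PySem.List.pyRange 1 ((seq.length : Int) + 1) 1).foldl
      (aStep seq) (PySem.Dict.empty, 0)).1.items
      = ((runPairs 0 seq).foldl (fun d p => d.modify p.1 [] (· ++ [p.2])) PySem.Dict.empty).items := by
    have := congrArg PySem.Dict.items hA
    simpa [altGo_eq_foldl] using this
  rw [hA2, items_groupFold]
  -- A keys are the distinct values of seq
  have hkeysA : PySem.Set.ofList ((runPairs 0 seq).map (·.1)) = PySem.Set.ofList seq := by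
    rw [← PySem.Set.update_nil_left, ← PySem.Set.update_nil_left]
    exact update_runPairs_keys seq 0 []
  rw [hkeysA]
  -- B side: occ is the grouped position dict
  have hocc : ((PySem.List.enumerate seq).foldl
      (fun d iv => d.modify iv.2 [] (· ++ [iv.1])) PySem.Dict.empty).items
      = (PySem.Set.ofList seq).map (fun k => (k, posOf k 0 seq)) := by
    rw [show (PySem.List.enumerate seq).foldl
        (fun d iv => d.modify iv.2 [] (· ++ [iv.1])) PySem.Dict.empty
        = ((PySem.List.enumerate seq).map (fun iv => (iv.2, iv.1))).foldl
            (fun d p => d.modify p.1 [] (· ++ [p.2])) PySem.Dict.empty from by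
      rw [List.foldl_map]]
    rw [items_groupFold]
    have hkeys : ((PySem.List.enumerate seq).map (fun iv => (iv.2, iv.1))).map (·.1) = seq := by
      rw [List.map_map]
      exact PySem.List.map_snd_enumerate seq 0
    rw [hkeys]
    apply List.map_congr_left
    intro k _
    rw [filter_enumerate_posOf k seq 0]
  change _ = (((PySem.List.enumerate seq).foldl
      (fun d iv => d.modify iv.2 [] (· ++ [iv.1])) PySem.Dict.empty).items.foldl
        bOuter PySem.Dict.empty).items
  rw [hocc]
  -- B's outer loop appends one compressed block per distinct value
  rw [phase2 _ PySem.Dict.empty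
      (by
        rw [PySem.Dict.keys_empty, List.nil_append, List.map_map]
        have : ((fun kv : Int × List Int => kv.1) ∘ fun k => (k, posOf k 0 seq)) = id := rfl
        rw [this, List.map_id]
        exact PySem.Set.nodup_ofList seq)
      (by
        intro kv hkv
        obtain ⟨k, hk, rfl⟩ := List.mem_map.mp hkv
        exact posOf_ne_nil k seq 0 ((PySem.Set.mem_ofList _ _).mp hk))]
  rw [List.map_map]
  apply List.map_congr_left
  intro k _
  simp only [Function.comp]
  rw [← runPairs_filter k seq 0]
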